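-- pv_equiv track=rewrite | github.com/KosmoSuture/UnityHypernet | Hypernet Structure/0/0.1 - Hypernet Core/hypernet_core/boot.py | _chunk_documents
-- ===== SOURCE A (Python) =====
-- _DOC_CHUNK_SIZE = 8000
--
-- _MAX_TOTAL_DOC_CHARS = 60000
--
-- def _chunk_documents(docs: list[tuple[str, str]]) -> list[str]:
--     """Split documents into chunks that fit within message size limits.
--
--     Each chunk contains one or more complete documents. Documents are
--     never split mid-content — if a single document exceeds the chunk
--     size, it gets its own chunk. If total content exceeds the max,
--     later documents are summarized rather than dropped.
--     """
--     chunks: list[str] = []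
--     current_chunk = ""
--     total_chars = 0
--
--     for title, content in docs:
--         doc_text = f"## {title}\n\n{content}\n\n---\n\n"
--
--         # If we've exceeded the total budget, summarize remaining docs
--         if total_chars + len(doc_text) > _MAX_TOTAL_DOC_CHARS:
--             summary = f"## {title} (summarized)\n\n{content[:1500]}...\n\n---\n\n"
--             doc_text = summary
--
--         # If adding this doc would exceed chunk size, start new chunk
--         if current_chunk and len(current_chunk) + len(doc_text) > _DOC_CHUNK_SIZE:
--             chunks.append(current_chunk)
--             current_chunk = doc_text
--         else:
--             current_chunk += doc_text
--
--         total_chars += len(doc_text)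
--
--     if current_chunk:
--         chunks.append(current_chunk)
--
--     return chunks if chunks else ["(No orientation documents found.)"]
-- ===== SOURCE B (Python) =====
-- _DOC_CHUNK_SIZE = 8000
--
-- _MAX_TOTAL_DOC_CHARS = 60000
--
--
-- def _chunk_documents(docs: list[tuple[str, str]]) -> list[str]:
--     """Staged version: render the texts, compute how many consecutive texts
--     each chunk takes (arithmetic on lengths only), then join each group once.
--     No chunk string is ever built incrementally."""
--     # Stage 1: render each document, summarizing once the running budget is spent.
--     texts: list[str] = []
--     total = 0
--     for title, content in docs:
--         text = f"## {title}\n\n{content}\n\n---\n\n"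
--         if total + len(text) > _MAX_TOTAL_DOC_CHARS:
--             text = f"## {title} (summarized)\n\n{content[:1500]}...\n\n---\n\n"
--         total += len(text)
--         texts.append(text)
--     if not texts:
--         return ["(No orientation documents found.)"]
--     # Stage 2: greedy group sizes — counts[k] = number of texts in chunk k,
--     # decided from the running length alone.
--     counts: list[int] = []
--     n = 0
--     run = 0
--     for t in texts:
--         if run and run + len(t) > _DOC_CHUNK_SIZE:
--             counts.append(n)
--             n, run = 1, len(t)
--         else:
--             n, run = n + 1, run + len(t)
--     counts.append(n)
--     # Stage 3: materialize each chunk with a single join.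
--     chunks: list[str] = []
--     rest = texts
--     for c in counts:
--         chunks.append("".join(rest[:c]))
--         rest = rest[c:]
--     return chunks
-- ===== Notes on version B (the rewrite author's own statement) =====
-- stated objective: alternative
-- what changed: A builds each chunk string incrementally inside one interleaved loop; B works in three stages: render the texts (summarizing once the running budget is spent), compute each chunk's group size purely from integer lengths, then materialize every chunk with a single join of its group.
import Mathlib
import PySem

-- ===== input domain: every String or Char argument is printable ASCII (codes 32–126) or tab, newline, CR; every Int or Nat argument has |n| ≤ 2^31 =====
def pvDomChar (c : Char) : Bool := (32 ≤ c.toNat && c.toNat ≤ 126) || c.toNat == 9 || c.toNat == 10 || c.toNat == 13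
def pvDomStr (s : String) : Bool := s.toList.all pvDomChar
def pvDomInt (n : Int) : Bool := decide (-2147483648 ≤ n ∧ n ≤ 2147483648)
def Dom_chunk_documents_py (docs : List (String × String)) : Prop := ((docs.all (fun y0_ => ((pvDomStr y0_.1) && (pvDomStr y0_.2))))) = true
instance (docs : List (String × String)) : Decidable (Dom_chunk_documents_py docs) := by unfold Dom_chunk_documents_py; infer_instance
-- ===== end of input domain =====

-- B replaces A's incremental chunk-string building by three stages: render the texts,
-- compute per-chunk group sizes from lengths alone, then join each group once; objective: alternative.

-- ===== PORT A =====
-- loop body of A's for-loop: state = (chunks, current_chunk, total_chars)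
def pvLoopA (st : List String × String × Int) (doc : String × String) :
    List String × String × Int :=
  let (chunks, current_chunk, total_chars) := st
  let (title, content) := doc
  let doc_text := "## " ++ title ++ "\n\n" ++ content ++ "\n\n---\n\n"
  let doc_text :=
    if total_chars + PySem.Str.len doc_text > 60000 then
      "## " ++ title ++ " (summarized)\n\n" ++ PySem.Str.slice content none (some 1500)
        ++ "...\n\n---\n\n"
    else doc_text
  if current_chunk ≠ "" ∧ PySem.Str.len current_chunk + PySem.Str.len doc_text > 8000 then
    (chunks ++ [current_chunk], doc_text, total_chars + PySem.Str.len doc_text)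
  else
    (chunks, current_chunk ++ doc_text, total_chars + PySem.Str.len doc_text)

def chunk_documents_py (docs : List (String × String)) : List String :=
  let st := docs.foldl pvLoopA ([], "", 0)
  let chunks := if st.2.1 ≠ "" then st.1 ++ [st.2.1] else st.1
  if chunks ≠ [] then chunks else ["(No orientation documents found.)"]

-- ===== PORT B =====
-- stage 1 loop body: state = (total, texts)
def pvStepRender (st : Int × List String) (doc : String × String) : Int × List String :=
  let (total, texts) := st
  let (title, content) := doc
  let text := "## " ++ title ++ "\n\n" ++ content ++ "\n\n---\n\n"
  let text :=
    if total + PySem.Str.len text > 60000 then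
      "## " ++ title ++ " (summarized)\n\n" ++ PySem.Str.slice content none (some 1500)
        ++ "...\n\n---\n\n"
    else text
  (total + PySem.Str.len text, texts ++ [text])

-- stage 2 loop body: state = (counts, n, run) — group sizes from lengths only
def pvStepCount (st : List Int × Int × Int) (t : String) : List Int × Int × Int :=
  let (counts, n, run) := st
  if run ≠ 0 ∧ run + PySem.Str.len t > 8000 then
    (counts ++ [n], 1, PySem.Str.len t)
  else
    (counts, n + 1, run + PySem.Str.len t)

-- stage 3 loop body: state = (chunks, rest) — one join per chunk
def pvStepJoin (st : List String × List String) (c : Int) : List String × List String :=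
  let (chunks, rest) := st
  (chunks ++ [PySem.Str.join "" (PySem.List.slice rest none (some c))],
   PySem.List.slice rest (some c) none)

def chunk_documents_py_alt (docs : List (String × String)) : List String :=
  let texts := (docs.foldl pvStepRender (0, [])).2
  if texts = [] then ["(No orientation documents found.)"]
  else
    let st := texts.foldl pvStepCount ([], 0, 0)
    let counts := st.1 ++ [st.2.1]
    (counts.foldl pvStepJoin ([], texts)).1

-- ===== PRECONDITION & SPEC =====
def Spec_chunk_documents_py (docs : List (String × String)) (out : List String) : Prop := out = chunk_documents_py_alt docs
instance (docs : List (String × String)) (out : List String) : Decidable (Spec_chunk_documents_py docs out) := by unfold Spec_chunk_documents_py; infer_instance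

-- ===== CLAIM (what is proved, stated in full; the proofs are below) =====
def Claim_equal_chunk_documents_py : Prop := ∀ (docs : List (String × String)), Dom_chunk_documents_py docs → Spec_chunk_documents_py docs (chunk_documents_py docs)

-- ===== LEMMAS AND PROOFS =====

-- the rendered texts, as a function of the starting budget
def pvTexts : List (String × String) → Int → List String
  | [], _ => []
  | (title, content) :: rest, total =>
    let doc_text := "## " ++ title ++ "\n\n" ++ content ++ "\n\n---\n\n"
    let doc_text :=
      if total + PySem.Str.len doc_text > 60000 then
        "## " ++ title ++ " (summarized)\n\n" ++ PySem.Str.slice content none (some 1500)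
          ++ "...\n\n---\n\n"
      else doc_text
    doc_text :: pvTexts rest (total + PySem.Str.len doc_text)

def pvLenSum (l : List String) : Int := (l.map PySem.Str.len).sum

-- A's packing loop body in isolation: state = (chunks, current_chunk)
def pvStepPack (st : List String × String) (t : String) : List String × String :=
  let (chunks, current) := st
  if current ≠ "" ∧ PySem.Str.len current + PySem.Str.len t > 8000 then
    (chunks ++ [current], t)
  else
    (chunks, current ++ t)

-- direct recursive form of greedy packing (with the final flush)
def pvPackRec : List String → String → List String
  | [], cur => if cur ≠ "" then [cur] else []
  | t :: rest, cur =>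
    if cur ≠ "" ∧ PySem.Str.len cur + PySem.Str.len t > 8000 then
      cur :: pvPackRec rest t
    else
      pvPackRec rest (cur ++ t)

-- direct recursive form of B's group-size computation
def pvCountsRec : List String → Int → Int → List Int
  | [], n, _ => [n]
  | t :: rest, n, run =>
    if run ≠ 0 ∧ run + PySem.Str.len t > 8000 then
      n :: pvCountsRec rest 1 (PySem.Str.len t)
    else
      pvCountsRec rest (n + 1) (run + PySem.Str.len t)

def pvConcat (l : List String) : String := l.foldl (· ++ ·) ""

lemma pvFlatten_intersperse_nil : ∀ (l : List (List Char)),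
    (List.intersperse ([] : List Char) l).flatten = l.flatten
  | [] => rfl
  | [_] => rfl
  | a :: b :: t => by
    rw [show List.intersperse ([] : List Char) (a :: b :: t)
          = a :: [] :: List.intersperse ([] : List Char) (b :: t) from rfl]
    simp [pvFlatten_intersperse_nil (b :: t)]

lemma pvJoin_nil_cons (a : String) (t : List String) :
    PySem.Str.join "" (a :: t) = a ++ PySem.Str.join "" t := by
  simp only [PySem.Str.join, PySem.Chars.join, List.intercalate, List.map_cons]
  rw [show "".toList = ([] : List Char) from rfl,
    pvFlatten_intersperse_nil, pvFlatten_intersperse_nil]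
  simp [String.ofList_append]

lemma pvFoldl_append_str (l : List String) : ∀ (s : String),
    l.foldl (· ++ ·) s = s ++ l.foldl (· ++ ·) "" := by
  induction l with
  | nil => intro s; simp
  | cons a t ih =>
    intro s
    simp only [List.foldl_cons]
    rw [ih (s ++ a), ih ("" ++ a)]
    simp [String.append_assoc]

lemma pvJoin_eq_concat (l : List String) : PySem.Str.join "" l = pvConcat l := by
  induction l with
  | nil => rfl
  | cons a t ih =>
    rw [pvJoin_nil_cons, ih]
    unfold pvConcat
    rw [List.foldl_cons, pvFoldl_append_str t ("" ++ a)]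
    simp

lemma pvConcat_append_singleton (l : List String) (t : String) :
    pvConcat (l ++ [t]) = pvConcat l ++ t := by
  unfold pvConcat; rw [List.foldl_append]; rfl

lemma pvLen_concat (l : List String) : PySem.Str.len (pvConcat l) = pvLenSum l := by
  induction l using List.reverseRecOn with
  | nil => simp [pvConcat, pvLenSum, PySem.Str.len_eq]
  | append_singleton l t ih =>
    rw [pvConcat_append_singleton, PySem.Str.len_append, ih]
    simp [pvLenSum]

lemma pvLen_nonneg (s : String) : 0 ≤ PySem.Str.len s := by simp [PySem.Str.len_eq]

lemma pvLen_eq_zero_iff (s : String) : PySem.Str.len s = 0 ↔ s = "" := by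
  simp [PySem.Str.len_eq]

lemma pvLenSum_cons (t : String) (ts : List String) :
    pvLenSum (t :: ts) = PySem.Str.len t + pvLenSum ts := by simp [pvLenSum]

lemma pvLenSum_nonneg : ∀ (l : List String), 0 ≤ pvLenSum l
  | [] => by simp [pvLenSum]
  | t :: ts => by
    have h1 := pvLen_nonneg t
    have h2 := pvLenSum_nonneg ts
    rw [pvLenSum_cons]; omega

lemma pvLenSum_append_singleton (l : List String) (t : String) :
    pvLenSum (l ++ [t]) = pvLenSum l + PySem.Str.len t := by simp [pvLenSum]

-- pass 1 of B: the fold computes pvTexts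
lemma pass1_eq (docs : List (String × String)) : ∀ (total : Int) (acc : List String),
    docs.foldl pvStepRender (total, acc)
      = (total + pvLenSum (pvTexts docs total), acc ++ pvTexts docs total) := by
  induction docs with
  | nil => intro total acc; simp [pvTexts, pvLenSum]
  | cons d rest ih =>
    intro total acc
    obtain ⟨title, content⟩ := d
    simp only [List.foldl_cons, pvStepRender, pvTexts, pvLenSum, List.map_cons, List.sum_cons]
    rw [ih]
    simp only [Prod.mk.injEq]
    exact ⟨by simp only [pvLenSum]; ring, by simp⟩

-- A's whole loop = pass 1 followed by the pure packing fold
lemma loopA_eq (docs : List (String × String)) :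
    ∀ (chunks : List String) (cur : String) (total : Int),
    docs.foldl pvLoopA (chunks, cur, total)
      = (((pvTexts docs total).foldl pvStepPack (chunks, cur)).1,
         ((pvTexts docs total).foldl pvStepPack (chunks, cur)).2,
         total + pvLenSum (pvTexts docs total)) := by
  induction docs with
  | nil => intro chunks cur total; simp [pvTexts, pvLenSum]
  | cons d rest ih =>
    intro chunks cur total
    obtain ⟨title, content⟩ := d
    simp only [List.foldl_cons, pvLoopA, pvTexts, pvStepPack]
    set t := (if total + PySem.Str.len ("## " ++ title ++ "\n\n" ++ content ++ "\n\n---\n\n") > 60000 then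
      "## " ++ title ++ " (summarized)\n\n" ++ PySem.Str.slice content none (some 1500)
        ++ "...\n\n---\n\n"
      else "## " ++ title ++ "\n\n" ++ content ++ "\n\n---\n\n") with ht
    by_cases h : cur ≠ "" ∧ PySem.Str.len cur + PySem.Str.len t > 8000
    · simp only [if_pos h, ih, pvLenSum, List.map_cons, List.sum_cons]
      simp only [Prod.mk.injEq, true_and]
      ring
    · simp only [if_neg h, ih, pvLenSum, List.map_cons, List.sum_cons]
      simp only [Prod.mk.injEq, true_and]
      ring

-- every rendered text is nonempty (it starts with "## ")
lemma pvTexts_len_pos (docs : List (String × String)) :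
    ∀ (total : Int) (t : String), t ∈ pvTexts docs total → 0 < PySem.Str.len t := by
  induction docs with
  | nil => intro total t ht; simp [pvTexts] at ht
  | cons d rest ih =>
    intro total t ht
    obtain ⟨title, content⟩ := d
    simp only [pvTexts, List.mem_cons] at ht
    rcases ht with h | h
    · subst h
      split_ifs with hc
      · rw [show ("## " ++ title ++ " (summarized)\n\n" ++ PySem.Str.slice content none (some 1500)
            ++ "...\n\n---\n\n") = "## " ++ (title ++ " (summarized)\n\n" ++ PySem.Str.slice content none (some 1500)
            ++ "...\n\n---\n\n") from by simp [String.append_assoc]]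
        rw [PySem.Str.len_append]
        have := pvLen_nonneg (title ++ " (summarized)\n\n" ++ PySem.Str.slice content none (some 1500) ++ "...\n\n---\n\n")
        have h3 : PySem.Str.len "## " = 3 := by decide
        omega
      · rw [show ("## " ++ title ++ "\n\n" ++ content ++ "\n\n---\n\n")
            = "## " ++ (title ++ "\n\n" ++ content ++ "\n\n---\n\n") from by simp [String.append_assoc]]
        rw [PySem.Str.len_append]
        have := pvLen_nonneg (title ++ "\n\n" ++ content ++ "\n\n---\n\n")
        have h3 : PySem.Str.len "## " = 3 := by decide
        omega
    · exact ih _ t h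

-- A's packing fold (with the final flush) = the recursive packer
lemma packA_eq (texts : List String) : ∀ (chunks : List String) (cur : String),
    (if (texts.foldl pvStepPack (chunks, cur)).2 ≠ ""
      then (texts.foldl pvStepPack (chunks, cur)).1 ++ [(texts.foldl pvStepPack (chunks, cur)).2]
      else (texts.foldl pvStepPack (chunks, cur)).1)
    = chunks ++ pvPackRec texts cur := by
  induction texts with
  | nil =>
    intro chunks cur
    simp only [List.foldl_nil, pvPackRec]
    split_ifs <;> simp_all
  | cons t rest ih =>
    intro chunks cur
    simp only [List.foldl_cons, pvStepPack, pvPackRec]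
    by_cases h : cur ≠ "" ∧ PySem.Str.len cur + PySem.Str.len t > 8000
    · rw [if_pos h, if_pos h, ih]
      simp
    · rw [if_neg h, if_neg h, ih]

-- B's counting fold = the recursive counter (appended final n)
lemma countB_eq (texts : List String) : ∀ (counts : List Int) (n run : Int),
    (texts.foldl pvStepCount (counts, n, run)).1 ++ [(texts.foldl pvStepCount (counts, n, run)).2.1]
      = counts ++ pvCountsRec texts n run := by
  induction texts with
  | nil => intro counts n run; simp [pvCountsRec]
  | cons t rest ih =>
    intro counts n run
    simp only [List.foldl_cons, pvStepCount, pvCountsRec]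
    by_cases h : run ≠ 0 ∧ run + PySem.Str.len t > 8000
    · rw [if_pos h, if_pos h, ih]
      simp
    · rw [if_neg h, if_neg h, ih]

lemma pvPackRec_ne_nil : ∀ (texts : List String) (cur : String),
    (∀ t ∈ texts, 0 < PySem.Str.len t) → (cur ≠ "" ∨ texts ≠ []) →
    pvPackRec texts cur ≠ []
  | [], cur, _, hd => by
    have hcur : cur ≠ "" := by tauto
    simp [pvPackRec, hcur]
  | t :: rest, cur, hpos, _ => by
    have ht := hpos t List.mem_cons_self
    have hrest : ∀ u ∈ rest, 0 < PySem.Str.len u :=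
      fun u hu => hpos u (List.mem_cons_of_mem _ hu)
    simp only [pvPackRec]
    split_ifs with h
    · simp
    · refine pvPackRec_ne_nil rest (cur ++ t) hrest (Or.inl ?_)
      intro he
      have := PySem.Str.len_append cur t
      rw [he] at this
      have h0 : PySem.Str.len "" = 0 := by decide
      have := pvLen_nonneg cur
      omega

-- the core correspondence: counts-then-join over (gp ++ rest) = recursive packing of rest
-- starting from the current group gp
lemma countsJoin_eq (rest : List String) :
    ∀ (gp chunks : List String) (n run : Int),
    n = (gp.length : Int) → run = pvLenSum gp →
    (∀ t ∈ gp, 0 < PySem.Str.len t) → (∀ t ∈ rest, 0 < PySem.Str.len t) →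
    (gp ≠ [] ∨ rest ≠ []) →
    ((pvCountsRec rest n run).foldl pvStepJoin (chunks, gp ++ rest)).1
      = chunks ++ pvPackRec rest (pvConcat gp) := by
  induction rest with
  | nil =>
    intro gp chunks n run hn hrun hgp _ hne
    have hgpne : gp ≠ [] := by tauto
    simp only [pvCountsRec, pvPackRec, List.foldl_cons, List.foldl_nil, pvStepJoin,
      List.append_nil]
    have hlenc := pvLen_concat gp
    have hcur : pvConcat gp ≠ "" := by
      intro h
      rw [h] at hlenc
      have h0 : PySem.Str.len "" = 0 := by decide
      obtain ⟨t0, ts, rfl⟩ : ∃ t0 ts, gp = t0 :: ts := by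
        rcases gp with _ | ⟨t0, ts⟩
        · exact absurd rfl hgpne
        · exact ⟨t0, ts, rfl⟩
      have ht := hgp t0 List.mem_cons_self
      have hts := pvLenSum_nonneg ts
      rw [pvLenSum_cons] at hlenc
      omega
    rw [if_pos hcur]
    subst hn
    rw [PySem.List.slice_to_natCast, List.take_length, pvJoin_eq_concat]
  | cons t0 rest' ih =>
    intro gp chunks n run hn hrun hgp hrest hne
    have hlen : PySem.Str.len (pvConcat gp) = run := by rw [pvLen_concat gp, hrun]
    have hiff : (run ≠ 0) ↔ (pvConcat gp ≠ "") := by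
      rw [← hlen]
      exact not_congr (pvLen_eq_zero_iff (pvConcat gp))
    have ht0 := hrest t0 List.mem_cons_self
    have hrest' : ∀ t ∈ rest', 0 < PySem.Str.len t :=
      fun t ht => hrest t (List.mem_cons_of_mem _ ht)
    simp only [pvCountsRec, pvPackRec]
    by_cases h : run ≠ 0 ∧ run + PySem.Str.len t0 > 8000
    · have hA : pvConcat gp ≠ "" ∧ PySem.Str.len (pvConcat gp) + PySem.Str.len t0 > 8000 := by
        rw [hlen]; exact ⟨hiff.mp h.1, h.2⟩
      rw [if_pos h, if_pos hA]
      simp only [List.foldl_cons, pvStepJoin]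
      subst hn
      rw [PySem.List.slice_to_natCast, PySem.List.slice_from_natCast,
        List.take_left, List.drop_left, pvJoin_eq_concat]
      have hrec := ih [t0] (chunks ++ [pvConcat gp]) 1 (PySem.Str.len t0)
        (by simp) (by rw [pvLenSum_cons]; simp [pvLenSum])
        (by intro u hu; simp only [List.mem_singleton] at hu; subst hu; exact ht0)
        hrest' (by simp)
      simp only [List.singleton_append] at hrec
      rw [hrec]
      have hc1 : pvConcat [t0] = t0 := by simp [pvConcat]
      rw [hc1]
      simp
    · have hA : ¬ (pvConcat gp ≠ "" ∧ PySem.Str.len (pvConcat gp) + PySem.Str.len t0 > 8000) := by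
        rw [hlen]; intro hc; exact h ⟨hiff.mpr hc.1, hc.2⟩
      rw [if_neg h, if_neg hA]
      have hrec := ih (gp ++ [t0]) chunks (n + 1) (run + PySem.Str.len t0)
        (by simp [hn]) (by rw [pvLenSum_append_singleton, hrun])
        (by intro u hu
            rcases List.mem_append.mp hu with h1 | h1
            · exact hgp u h1
            · simp only [List.mem_singleton] at h1; subst h1; exact ht0)
        hrest' (by simp)
      rw [List.append_assoc, List.singleton_append] at hrec
      rw [hrec, pvConcat_append_singleton]

-- ===== VERDICT (by name: the statement is the Claim_ definition above) =====
theorem chunk_documents_py_spec : Claim_equal_chunk_documents_py := by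
  intro docs _
  unfold Spec_chunk_documents_py chunk_documents_py chunk_documents_py_alt
  rw [loopA_eq docs [] "" 0, pass1_eq docs 0 []]
  simp only [List.nil_append]
  by_cases hne : pvTexts docs 0 = []
  · rw [hne]
    simp
  · rw [if_neg hne]
    have hpack := packA_eq (pvTexts docs 0) [] ""
    simp only [List.nil_append] at hpack
    rw [hpack]
    have hnil : pvPackRec (pvTexts docs 0) "" ≠ [] :=
      pvPackRec_ne_nil _ _ (fun t ht => pvTexts_len_pos docs 0 t ht) (Or.inr hne)
    rw [if_pos hnil]
    have hc := countB_eq (pvTexts docs 0) [] 0 0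
    simp only [List.nil_append] at hc
    rw [hc]
    have hmain := countsJoin_eq (pvTexts docs 0) [] [] 0 0 (by simp)
      (by simp [pvLenSum]) (by simp)
      (fun t ht => pvTexts_len_pos docs 0 t ht) (Or.inr hne)
    simp only [List.nil_append] at hmain
    rw [hmain]
    simp [pvConcat]
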